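-- pv_equiv track=rewrite | github.com/Joseph1103/Proyecto_Taller | Tarea de Intro.py | lista_split_aux
-- ===== SOURCE A (Python) =====
-- def lista_split_aux(num, lista_0_4, lista_5_9):
--         if (num==0):
--             return lista_0_4, lista_5_9
--         else:
--             digito = num%10
--
--             if (digito <=4):
--                 lista_0_4.append(digito)
--             else:
--                 lista_5_9.append(digito)
--             return lista_split_aux(num//10, lista_0_4, lista_5_9)
-- ===== SOURCE B (Python) =====
-- def lista_split_aux(num, lista_0_4, lista_5_9):
--     # extract digits (least-significant first), then split with two filters;
--     # returns fresh lists (does not mutate the arguments, unlike A)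
--     digits = []
--     while num != 0:
--         digits.append(num % 10)
--         num //= 10
--     return lista_0_4 + [d for d in digits if d <= 4], lista_5_9 + [d for d in digits if d > 4]
-- ===== Notes on version B (the rewrite author's own statement) =====
-- stated objective: alternative
-- what changed: Replaces A's recursion that appends into the two result lists at each step by a flat loop that first extracts the digit list and then splits it with two filters; B builds fresh lists instead of mutating the arguments.
import Mathlib
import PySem

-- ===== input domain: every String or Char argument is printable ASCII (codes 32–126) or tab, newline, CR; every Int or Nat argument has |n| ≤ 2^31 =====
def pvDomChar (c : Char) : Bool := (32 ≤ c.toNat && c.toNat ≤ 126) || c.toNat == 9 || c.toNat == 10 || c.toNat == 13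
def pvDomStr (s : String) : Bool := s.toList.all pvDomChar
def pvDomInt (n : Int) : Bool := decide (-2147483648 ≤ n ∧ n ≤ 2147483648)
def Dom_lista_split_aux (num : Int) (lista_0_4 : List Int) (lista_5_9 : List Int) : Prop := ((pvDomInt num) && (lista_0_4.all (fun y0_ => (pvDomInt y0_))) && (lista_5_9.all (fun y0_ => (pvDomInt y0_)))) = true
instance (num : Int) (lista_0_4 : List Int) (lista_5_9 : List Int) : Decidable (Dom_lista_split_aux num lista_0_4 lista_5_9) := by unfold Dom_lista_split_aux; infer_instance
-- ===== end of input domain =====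

-- B replaces A's recursion (appending into the two result lists at each step) by first
-- extracting the digit list and then splitting it with two filters; equivalence is about
-- the RETURN value only (A mutates the argument lists in place, B builds fresh lists).

-- ===== PORT A =====
-- A's recursion, fueled: Python recurses on num//10 until num == 0; for num ≥ 0 (Pre_)
-- natAbs num + 1 steps always suffice, so the fuel-out branch is never reached there.
def lista_split_aux_rec : Nat → Int → List Int → List Int → List Int × List Int
  | 0, _, lista_0_4, lista_5_9 => (lista_0_4, lista_5_9)
  | fuel + 1, num, lista_0_4, lista_5_9 =>
    if num = 0 then (lista_0_4, lista_5_9)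
    else
      let digito := PySem.Int.mod num 10
      if digito ≤ 4 then
        lista_split_aux_rec fuel (PySem.Int.floordiv num 10) (lista_0_4 ++ [digito]) lista_5_9
      else
        lista_split_aux_rec fuel (PySem.Int.floordiv num 10) lista_0_4 (lista_5_9 ++ [digito])

def lista_split_aux (num : Int) (lista_0_4 : List Int) (lista_5_9 : List Int) : List Int × List Int :=
  lista_split_aux_rec (num.natAbs + 1) num lista_0_4 lista_5_9

-- ===== PORT B =====
-- B's while loop extracting digits least-significant first (same fuel bound).
def pvDigits : Nat → Int → List Int
  | 0, _ => []
  | fuel + 1, num =>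
    if num = 0 then []
    else PySem.Int.mod num 10 :: pvDigits fuel (PySem.Int.floordiv num 10)

def lista_split_aux_alt (num : Int) (lista_0_4 : List Int) (lista_5_9 : List Int) : List Int × List Int :=
  let digits := pvDigits (num.natAbs + 1) num
  (lista_0_4 ++ digits.filter (fun d => d ≤ 4), lista_5_9 ++ digits.filter (fun d => d > 4))

-- ===== PRECONDITION & SPEC =====
-- Pre_ excludes negative num, on which the Python A never reaches 0 and raises RecursionError
-- (and B's while loop diverges).
def Pre_lista_split_aux (num : Int) (_lista_0_4 : List Int) (_lista_5_9 : List Int) : Prop := 0 ≤ num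
instance (num : Int) (lista_0_4 : List Int) (lista_5_9 : List Int) : Decidable (Pre_lista_split_aux num lista_0_4 lista_5_9) := by unfold Pre_lista_split_aux; infer_instance
def pvWitness_lista_split_aux : Int × List Int × List Int := (907, [1], [8])

def Spec_lista_split_aux (num : Int) (lista_0_4 : List Int) (lista_5_9 : List Int) (out : List Int × List Int) : Prop := out = lista_split_aux_alt num lista_0_4 lista_5_9
instance (num : Int) (lista_0_4 : List Int) (lista_5_9 : List Int) (out : List Int × List Int) : Decidable (Spec_lista_split_aux num lista_0_4 lista_5_9 out) := by unfold Spec_lista_split_aux; infer_instance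

-- ===== CLAIM (what is proved, stated in full; the proofs are below) =====
def Claim_equal_lista_split_aux : Prop := ∀ (num : Int) (lista_0_4 : List Int) (lista_5_9 : List Int), Dom_lista_split_aux num lista_0_4 lista_5_9 → Pre_lista_split_aux num lista_0_4 lista_5_9 → Spec_lista_split_aux num lista_0_4 lista_5_9 (lista_split_aux num lista_0_4 lista_5_9)

-- ===== LEMMAS AND PROOFS =====

-- For ANY fuel and num, A's fueled recursion equals B's extract-then-filter decomposition.
theorem lista_split_aux_rec_eq (fuel : Nat) :
    ∀ (num : Int) (l1 l2 : List Int),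
      lista_split_aux_rec fuel num l1 l2 =
        (l1 ++ (pvDigits fuel num).filter (fun d => d ≤ 4),
         l2 ++ (pvDigits fuel num).filter (fun d => d > 4)) := by
  induction fuel with
  | zero => intro num l1 l2; simp [lista_split_aux_rec, pvDigits]
  | succ fuel ih =>
    intro num l1 l2
    by_cases h : num = 0
    · simp [lista_split_aux_rec, pvDigits, h]
    · simp [lista_split_aux_rec, pvDigits, h, ih, List.filter_cons]
      split_ifs with h1 h2 <;> first | rfl | omega

-- ===== VERDICT (by name: the statement is the Claim_ definition above) =====
theorem lista_split_aux_spec : Claim_equal_lista_split_aux := by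
  intro num l1 l2 _ _
  unfold Spec_lista_split_aux lista_split_aux lista_split_aux_alt
  exact lista_split_aux_rec_eq (num.natAbs + 1) num l1 l2
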